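/- GENERATED by mk_final_copies.py from the proof of the farm's unit `vorbis_decode_packet_rest.4b` (farm:vorbis_decode_packet_rest.4b.1: Proof.lean) as the
   re-elaboration sweep compiled it — do not edit. -/
import Asan.CheckWalk
import Vorbis.Spec.Units.vorbis_decode_packet_rest_4b
import Vorbis.Spec.Worked.vorbis_decode_packet_rest_4b_Lemmas

open X86 X86.User Asan Vorbis Vorbis.Spec Vorbis.Spec.vorbis_decode_packet_rest

/-- Segment .4b of `vorbis_decode_packet_rest` (0x110d5c … 0x110d93): `c = f->codebooks + book` and the optional call of prep_huffman, from `At4b` to `At4c`: lemma `segB` of Lemmas.lean (the farm worker's sub-segment B). -/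
theorem Vorbis.Spec.Worked.vorbis_decode_packet_rest_4b_ok : Vorbis.Spec.vorbis_decode_packet_rest_4b.Statement := by
  intro Lay hLay μ hμ u₀ hcode h_prep hl8 hl4
  exact Vorbis.Spec.vorbis_decode_packet_rest_4b.segB hLay hμ hcode h_prep hl8 hl4
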